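-- pv_equiv track=rewrite | github.com/agustinpodesta/Python-Course | ejercicios_python/propaga.py | propagar_al_vecino
-- ===== SOURCE A (Python) =====
-- def propagar_al_vecino(l):
--     condicion = False
--     largo = len(l)
--     for n_i , i in enumerate(l):
--         if i == 1 and n_i < largo-1 and l[n_i+1] == 0:
-- #Esto es para ver si un 1 tiene ADELANTE un 0, para convertirlo en un 1, pero tiene la
-- #condicion de que si ese 1 es el ultimo numero de la lista (n_i < largo-1), no entra
-- #en el if. Ya que de no poner esto, el l[n_i+1] == 0 me daria un 'List out of range'.
--             l[n_i+1] = 1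
--             condicion = True
--         if i == 1 and n_i > 0 and l[n_i-1] == 0:
-- #Esto es para ver si un 1 tiene ATRAS un 0, para convertirlo en un 1, pero tiene la
-- #condicion de que si ese 1 es el primer numero de la lista (n_i > 0), no entra
-- #en el if. Ya que de no poner esto, el l[n_i-1] == 0 me daria un 'List out of range'.
--             l[n_i-1] = 1
--             condicion = True
--         else:
--             continue
--     return condicion
--
-- l = [0,0,0,0,1]
-- ===== SOURCE B (Python) =====
-- def propagar_al_vecino(l):
--     # Two sequential passes instead of A's interleaved single loop; same in-place mutation.
--     changed = False
--     n = len(l)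
--     for i in range(n - 1):
--         if l[i] == 1 and l[i + 1] == 0:
--             l[i + 1] = 1
--             changed = True
--     for i in range(1, n):
--         if l[i] == 1 and l[i - 1] == 0:
--             l[i - 1] = 1
--             changed = True
--     return changed
-- ===== Notes on version B (the rewrite author's own statement) =====
-- stated objective: simpler
-- what changed: A's single interleaved loop doing forward and backward propagation at each index is split into two plain sequential passes (forward pass, then backward pass) with straight bound checks from range(), removing the per-iteration boundary guards and the enumerate over a mutating list.
import Mathlib
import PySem

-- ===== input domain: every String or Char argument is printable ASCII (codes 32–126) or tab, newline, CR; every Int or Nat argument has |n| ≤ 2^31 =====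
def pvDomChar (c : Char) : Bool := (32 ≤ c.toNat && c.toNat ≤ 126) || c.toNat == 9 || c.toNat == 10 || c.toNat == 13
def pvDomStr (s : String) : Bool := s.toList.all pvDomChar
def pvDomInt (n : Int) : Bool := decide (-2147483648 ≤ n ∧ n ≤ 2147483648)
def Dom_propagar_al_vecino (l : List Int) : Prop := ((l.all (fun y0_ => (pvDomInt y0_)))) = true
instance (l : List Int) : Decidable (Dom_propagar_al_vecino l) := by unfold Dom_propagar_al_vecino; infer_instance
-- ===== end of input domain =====

-- B replaces A's single interleaved loop by two sequential passes (forward, then backward)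
-- over the same list; same return value and same in-place mutation (equivalence proved on the
-- return value only). Objective: simpler.

-- ===== PORT A =====
-- one iteration of A's for-loop at index n: read i = l[n], forward write, then backward write
def stepA (largo : Nat) (p : List Int × Bool) (n : Nat) : List Int × Bool :=
  let i := p.1.getD n 0
  let p := if i = 1 ∧ n < largo - 1 ∧ p.1.getD (n + 1) 0 = 0 then (p.1.set (n + 1) 1, true) else p
  if i = 1 ∧ 0 < n ∧ p.1.getD (n - 1) 0 = 0 then (p.1.set (n - 1) 1, true) else p

def propagar_al_vecino (l : List Int) : Bool :=
  (List.foldl (stepA l.length) (l, false) (List.range l.length)).2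

-- ===== PORT B =====
-- pass 1 (forward): for i in range(n-1): if l[i]==1 and l[i+1]==0: l[i+1]=1
def fwdB (p : List Int × Bool) (i : Nat) : List Int × Bool :=
  if p.1.getD i 0 = 1 ∧ p.1.getD (i + 1) 0 = 0 then (p.1.set (i + 1) 1, true) else p

-- pass 2 (backward): for i in range(1,n): if l[i]==1 and l[i-1]==0: l[i-1]=1
def bwdB (p : List Int × Bool) (i : Nat) : List Int × Bool :=
  if p.1.getD i 0 = 1 ∧ p.1.getD (i - 1) 0 = 0 then (p.1.set (i - 1) 1, true) else p

def propagar_al_vecino_alt (l : List Int) : Bool :=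
  let p := List.foldl fwdB (l, false) (List.range (l.length - 1))
  (List.foldl bwdB p (List.range' 1 (l.length - 1))).2

-- ===== PRECONDITION & SPEC =====
def Spec_propagar_al_vecino (l : List Int) (out : Bool) : Prop := out = propagar_al_vecino_alt l
instance (l : List Int) (out : Bool) : Decidable (Spec_propagar_al_vecino l out) := by unfold Spec_propagar_al_vecino; infer_instance

-- ===== CLAIM (what is proved, stated in full; the proofs are below) =====
def Claim_equal_propagar_al_vecino : Prop := ∀ (l : List Int), Dom_propagar_al_vecino l → Spec_propagar_al_vecino l (propagar_al_vecino l)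

-- ===== LEMMAS AND PROOFS =====

-- A's guarded forward/backward steps (helpers for the proof only)
def fwdA (largo : Nat) (p : List Int × Bool) (n : Nat) : List Int × Bool :=
  if p.1.getD n 0 = 1 ∧ n < largo - 1 ∧ p.1.getD (n + 1) 0 = 0 then (p.1.set (n + 1) 1, true) else p

def bwdA (p : List Int × Bool) (n : Nat) : List Int × Bool :=
  if p.1.getD n 0 = 1 ∧ 0 < n ∧ p.1.getD (n - 1) 0 = 0 then (p.1.set (n - 1) 1, true) else p

lemma getD_set_ne (xs : List Int) (m n : Nat) (v : Int) (h : m ≠ n) :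
    (xs.set m v).getD n 0 = xs.getD n 0 := by
  simp [List.getD_eq_getElem?_getD, List.getElem?_set_ne h]

-- A's loop body is forward-then-backward (the re-read of l[n] is unchanged by the forward write)
lemma stepA_eq (largo : Nat) (p : List Int × Bool) (n : Nat) :
    stepA largo p n = bwdA (fwdA largo p n) n := by
  unfold stepA fwdA bwdA
  by_cases hf : p.1.getD n 0 = 1 ∧ n < largo - 1 ∧ p.1.getD (n + 1) 0 = 0
  · simp only [if_pos hf]
    rw [getD_set_ne p.1 (n + 1) n 1 (by omega)]
  · simp only [if_neg hf]

-- the backward step at n commutes with any forward step at m > n (disjoint cells)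
lemma comm_step (largo : Nat) (p : List Int × Bool) (n m : Nat) (h : n < m) :
    fwdA largo (bwdA p n) m = bwdA (fwdA largo p m) n := by
  unfold fwdA bwdA
  by_cases hn : 0 < n
  · have h1 : (n - 1 : Nat) ≠ m := by omega
    have h2 : (n - 1 : Nat) ≠ m + 1 := by omega
    have h3 : (m + 1 : Nat) ≠ n := by omega
    have h4 : (m + 1 : Nat) ≠ n - 1 := by omega
    by_cases hb : p.1.getD n 0 = 1 ∧ 0 < n ∧ p.1.getD (n - 1) 0 = 0 <;>
    by_cases hf : p.1.getD m 0 = 1 ∧ m < largo - 1 ∧ p.1.getD (m + 1) 0 = 0 <;>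
      simp only [hb, hf, if_pos, getD_set_ne _ _ _ _ h1, getD_set_ne _ _ _ _ h2,
        getD_set_ne _ _ _ _ h3, getD_set_ne _ _ _ _ h4, and_true, if_false] <;>
      simp_all [getD_set_ne _ _ _ _ h1, getD_set_ne _ _ _ _ h2,
        getD_set_ne _ _ _ _ h3, getD_set_ne _ _ _ _ h4] <;>
      rw [List.set_comm _ _ (by omega : (m + 1 : Nat) ≠ n - 1)]
  · have hn0 : n = 0 := by omega
    subst hn0
    simp

-- push a single backward step past a whole tail of forward steps at larger indices
lemma comm_fold (largo : Nat) (n : Nat) : ∀ (ms : List Nat) (p : List Int × Bool),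
    (∀ m ∈ ms, n < m) →
    List.foldl (fwdA largo) (bwdA p n) ms = bwdA (List.foldl (fwdA largo) p ms) n := by
  intro ms
  induction ms with
  | nil => intro p _; rfl
  | cons m rest ih =>
    intro p hmem
    simp only [List.foldl_cons]
    rw [comm_step largo p n m (hmem m (List.mem_cons_self))]
    exact ih (fwdA largo p m) (fun x hx => hmem x (List.mem_cons_of_mem m hx))

-- interleaved pass = forward pass then backward pass, over the same index range
lemma interleave (largo : Nat) : ∀ (k n : Nat) (p : List Int × Bool),
    List.foldl (stepA largo) p (List.range' n k) =
      List.foldl bwdA (List.foldl (fwdA largo) p (List.range' n k)) (List.range' n k) := by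
  intro k
  induction k with
  | zero => intro n p; rfl
  | succ k ih =>
    intro n p
    rw [List.range'_succ]
    simp only [List.foldl_cons]
    rw [stepA_eq, ih (n + 1) (bwdA (fwdA largo p n) n)]
    rw [comm_fold largo n (List.range' (n + 1) k) (fwdA largo p n)
      (fun m hm => by have := List.mem_range'_1.mp hm; omega)]

-- A's guarded steps coincide with B's unguarded ones inside B's ranges, and are no-ops at the ends
lemma fwdA_eq_fwdB (largo : Nat) (p : List Int × Bool) (m : Nat) (h : m < largo - 1) :
    fwdA largo p m = fwdB p m := by
  unfold fwdA fwdB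
  by_cases h1 : p.1.getD m 0 = 1 <;> by_cases h2 : p.1.getD (m + 1) 0 = 0 <;> simp_all

lemma fwdA_last (largo : Nat) (p : List Int × Bool) (m : Nat) (h : ¬ m < largo - 1) :
    fwdA largo p m = p := by
  unfold fwdA; simp [h]

lemma bwdA_eq_bwdB (p : List Int × Bool) (m : Nat) (h : 0 < m) :
    bwdA p m = bwdB p m := by
  unfold bwdA bwdB
  by_cases h1 : p.1.getD m 0 = 1 <;> by_cases h2 : p.1.getD (m - 1) 0 = 0 <;> simp_all

lemma bwdA_zero (p : List Int × Bool) : bwdA p 0 = p := by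
  unfold bwdA; simp

lemma fold_fwd (largo : Nat) (p : List Int × Bool) (h : 0 < largo) :
    List.foldl (fwdA largo) p (List.range' 0 largo) =
      List.foldl fwdB p (List.range' 0 (largo - 1)) := by
  have hsplit : List.range' 0 largo = List.range' 0 (largo - 1) ++ [largo - 1] := by
    have : largo = (largo - 1) + 1 := by omega
    rw [this, List.range'_concat]
    simp
  rw [hsplit, List.foldl_append]
  simp only [List.foldl_cons, List.foldl_nil]
  rw [fwdA_last largo _ (largo - 1) (by omega)]
  exact PySem.List.foldl_congr_mem _ _ _ _ (fun acc x hx => by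
      have := List.mem_range'_1.mp hx
      exact (fwdA_eq_fwdB largo acc x (by omega)))

lemma fold_bwd (largo : Nat) (p : List Int × Bool) (h : 0 < largo) :
    List.foldl bwdA p (List.range' 0 largo) =
      List.foldl bwdB p (List.range' 1 (largo - 1)) := by
  have hsplit : List.range' 0 largo = 0 :: List.range' 1 (largo - 1) := by
    have : largo = (largo - 1) + 1 := by omega
    rw [this]
    rfl
  rw [hsplit]
  simp only [List.foldl_cons]
  rw [bwdA_zero]
  exact PySem.List.foldl_congr_mem _ _ _ _ (fun acc x hx => by
      have := List.mem_range'_1.mp hx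
      exact (bwdA_eq_bwdB acc x (by omega)))

-- ===== VERDICT (by name: the statement is the Claim_ definition above) =====
theorem propagar_al_vecino_spec : Claim_equal_propagar_al_vecino := by
  intro l _
  unfold Spec_propagar_al_vecino propagar_al_vecino propagar_al_vecino_alt
  rcases Nat.eq_zero_or_pos l.length with h0 | hpos
  · simp [h0]
  · have hr : ∀ k, List.range k = List.range' 0 k := fun k => List.range_eq_range'
    rw [hr, hr]
    rw [interleave l.length l.length 0 (l, false)]
    rw [fold_fwd l.length (l, false) hpos, fold_bwd l.length _ hpos]
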